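-- pv_equiv track=rewrite | github.com/dleemiller/CnakeCharmer | cnake_data/unpaired/quality_trim_single.py | quality_trim_index
-- ===== SOURCE A (Python) =====
-- def quality_trim_index(qualities, cutoff, base=33):
--     s = 0
--     max_qual = 0
--     max_i = len(qualities)
--     for i in range(len(qualities) - 1, -1, -1):
--         s += cutoff - (ord(qualities[i]) - base)
--         if s < 0:
--             break
--         if s > max_qual:
--             max_qual = s
--             max_i = i
--     return max_i
-- ===== SOURCE B (Python) =====
-- def quality_trim_index(qualities, cutoff, base=33):
--     n = len(qualities)
--     # stage 1: table of reverse cumulative sums, cut at the first negative value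
--     kept = []
--     s = 0
--     for c in reversed(qualities):
--         s += cutoff - (ord(c) - base)
--         if s < 0:
--             break
--         kept.append(s)
--     # stage 2: first-max-wins argmax over the table, threshold > 0
--     best = 0
--     best_k = None
--     for k, v in enumerate(kept):
--         if v > best:
--             best = v
--             best_k = k
--     return n if best_k is None else n - 1 - best_k
-- ===== Notes on version B (the rewrite author's own statement) =====
-- stated objective: alternative
-- what changed: Replaces A's single fused index-loop that tracks the running max on the fly with a two-stage computation: first materialise the reverse cumulative-sum table truncated at the first negative value, then do a separate first-max-wins argmax over that table and map the winning table position back to an original index.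
import Mathlib
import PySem

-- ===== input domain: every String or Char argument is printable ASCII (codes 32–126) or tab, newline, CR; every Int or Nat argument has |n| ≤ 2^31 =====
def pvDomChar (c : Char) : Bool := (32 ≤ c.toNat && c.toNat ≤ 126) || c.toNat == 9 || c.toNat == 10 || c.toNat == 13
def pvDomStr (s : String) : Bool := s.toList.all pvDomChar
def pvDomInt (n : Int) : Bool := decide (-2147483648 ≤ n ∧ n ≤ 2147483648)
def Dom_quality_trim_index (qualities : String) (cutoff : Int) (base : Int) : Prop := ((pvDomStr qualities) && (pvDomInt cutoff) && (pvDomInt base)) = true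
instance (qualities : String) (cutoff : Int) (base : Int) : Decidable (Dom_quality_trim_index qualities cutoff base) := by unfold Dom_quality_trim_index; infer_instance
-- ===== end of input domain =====

-- B replaces A's fused descending index-loop with a two-stage computation
-- (build the truncated reverse cumulative-sum table, then argmax over it);
-- objective: alternative structure, same O(n) cost. Proven equal everywhere.

-- ===== PORT A =====
-- the for-loop over range(len-1, -1, -1) with break; state (s, max_qual, max_i).
-- (pyGet? …).getD ' ' : the indices come from range and are always in bounds,
-- so the default is dead and the port is exact.
def qtiLoopA (qs : List Char) (cutoff base : Int) : List Int → Int → Int → Int → Int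
  | [], _, _, max_i => max_i
  | i :: rest, s, max_qual, max_i =>
    let s' := s + (cutoff - ((((PySem.List.pyGet? qs i).getD ' ').toNat : Int) - base))
    if s' < 0 then max_i
    else if max_qual < s' then qtiLoopA qs cutoff base rest s' s' i
    else qtiLoopA qs cutoff base rest s' max_qual max_i

def quality_trim_index (qualities : String) (cutoff : Int) (base : Int) : Int :=
  let qs := qualities.toList
  qtiLoopA qs cutoff base (PySem.List.pyRange ((qs.length : Int) - 1) (-1) (-1)) 0 0 (qs.length : Int)

-- ===== PORT B =====
-- stage 1 of Source B: the reverse cumulative-sum table, cut at the first negative value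
def qtiTable (cutoff base : Int) : List Char → Int → List Int
  | [], _ => []
  | c :: rest, s =>
    let s' := s + (cutoff - ((c.toNat : Int) - base))
    if s' < 0 then [] else s' :: qtiTable cutoff base rest s'

-- stage 2 of Source B: first-max-wins argmax with threshold best = 0
def qtiArgmax : List Int → Nat → Int → Option Nat → Option Nat
  | [], _, _, best_k => best_k
  | v :: rest, k, best, best_k =>
    if best < v then qtiArgmax rest (k + 1) v (some k)
    else qtiArgmax rest (k + 1) best best_k

def quality_trim_index_alt (qualities : String) (cutoff : Int) (base : Int) : Int :=
  let n := qualities.toList.length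
  match qtiArgmax (qtiTable cutoff base qualities.toList.reverse 0) 0 0 none with
  | none => (n : Int)
  | some k => (n : Int) - 1 - (k : Int)

-- ===== PRECONDITION & SPEC =====
def Spec_quality_trim_index (qualities : String) (cutoff : Int) (base : Int) (out : Int) : Prop := out = quality_trim_index_alt qualities cutoff base
instance (qualities : String) (cutoff : Int) (base : Int) (out : Int) : Decidable (Spec_quality_trim_index qualities cutoff base out) := by unfold Spec_quality_trim_index; infer_instance

-- ===== CLAIM (what is proved, stated in full; the proofs are below) =====
def Claim_equal_quality_trim_index : Prop := ∀ (qualities : String) (cutoff : Int) (base : Int), Dom_quality_trim_index qualities cutoff base → Spec_quality_trim_index qualities cutoff base (quality_trim_index qualities cutoff base)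

-- ===== LEMMAS AND PROOFS =====

-- A's loop with the (index, char) pairs made explicit
def qtiFused (cutoff base : Int) : List (Int × Char) → Int → Int → Int → Int
  | [], _, _, mi => mi
  | (i, c) :: rest, s, mq, mi =>
    let s' := s + (cutoff - ((c.toNat : Int) - base))
    if s' < 0 then mi
    else if mq < s' then qtiFused cutoff base rest s' s' i
    else qtiFused cutoff base rest s' mq mi

-- the pair list A effectively traverses: (n-1-j, r[0]), (n-1-(j+1), r[1]), …
def qtiPairs (n : Int) : Nat → List Char → List (Int × Char)
  | _, [] => []
  | j, c :: rest => (n - 1 - (j : Int), c) :: qtiPairs n (j + 1) rest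

def qtiIdx (n : Int) : Option Nat → Int
  | none => n
  | some k => n - 1 - (k : Int)

theorem qtiLoopA_eq_fused (qs : List Char) (cutoff base : Int) :
    ∀ (idxs : List Int) (s mq mi : Int),
      qtiLoopA qs cutoff base idxs s mq mi =
        qtiFused cutoff base (idxs.map (fun i => (i, (PySem.List.pyGet? qs i).getD ' '))) s mq mi := by
  intro idxs
  induction idxs with
  | nil => intro s mq mi; simp [qtiLoopA, qtiFused]
  | cons i rest ih =>
    intro s mq mi
    simp only [List.map_cons, qtiLoopA, qtiFused]
    split_ifs <;> simp [ih]

theorem qtiPairs_length (n : Int) : ∀ (j : Nat) (r : List Char), (qtiPairs n j r).length = r.length := by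
  intro j r
  induction r generalizing j with
  | nil => simp [qtiPairs]
  | cons c rest ih => simp [qtiPairs, ih]

theorem qtiPairs_getElem (n : Int) :
    ∀ (r : List Char) (j k : Nat) (h : k < r.length),
      (qtiPairs n j r)[k]'(by rw [qtiPairs_length]; exact h) = (n - 1 - ((j + k : Nat) : Int), r[k]) := by
  intro r
  induction r with
  | nil => intro j k h; simp at h
  | cons c rest ih =>
    intro j k h
    cases k with
    | zero => simp [qtiPairs]
    | succ m =>
      have hm : m < rest.length := by simpa using h
      have := ih (j + 1) m hm
      simp only [qtiPairs, List.getElem_cons_succ, this]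
      congr 1
      omega

theorem qtiPairs_eq_map_pyRange (qs : List Char) :
    (PySem.List.pyRange ((qs.length : Int) - 1) (-1) (-1)).map
        (fun i => (i, (PySem.List.pyGet? qs i).getD ' ')) =
      qtiPairs (qs.length : Int) 0 qs.reverse := by
  rw [PySem.List.pyRange_neg_one ((qs.length : Int) - 1) (-1),
    show (((qs.length : Int) - 1) - (-1)).toNat = qs.length from by omega]
  apply List.ext_getElem
  · simp [qtiPairs_length]
  · intro k h1 h2
    have hk : k < qs.length := by simpa using h1
    have hget : PySem.List.pyGet? qs (((qs.length : Int) - 1) - (k : Int)) =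
        some qs[qs.length - 1 - k] := by
      have hcast : ((qs.length : Int) - 1) - (k : Int) = ((qs.length - 1 - k : Nat) : Int) := by
        omega
      rw [hcast, PySem.List.pyGet?_natCast]
      exact List.getElem?_eq_getElem (by omega)
    have hrev : k < qs.reverse.length := by simpa using hk
    simp only [List.getElem_map, List.getElem_range]
    rw [qtiPairs_getElem _ _ _ _ (by simpa using hk), hget]
    simp [List.getElem_reverse]

theorem qtiFused_eq_argmax (cutoff base : Int) (n : Int) :
    ∀ (r : List Char) (j : Nat) (s best : Int) (bk : Option Nat),
      qtiFused cutoff base (qtiPairs n j r) s best (qtiIdx n bk) =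
        qtiIdx n (qtiArgmax (qtiTable cutoff base r s) j best bk) := by
  intro r
  induction r with
  | nil => intro j s best bk; simp [qtiPairs, qtiTable, qtiFused, qtiArgmax]
  | cons c rest ih =>
    intro j s best bk
    simp only [qtiPairs, qtiTable, qtiFused]
    by_cases h0 : s + (cutoff - ((c.toNat : Int) - base)) < 0
    · simp [h0, qtiArgmax]
    · simp only [if_neg h0]
      by_cases h1 : best < s + (cutoff - ((c.toNat : Int) - base))
      · simp only [if_pos h1, qtiArgmax]
        have : (n - 1 - (j : Int)) = qtiIdx n (some j) := rfl
        rw [this, ih]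
      · simp only [if_neg h1, qtiArgmax]
        rw [ih]

-- ===== VERDICT (by name: the statement is the Claim_ definition above) =====
theorem quality_trim_index_spec : Claim_equal_quality_trim_index := by
  intro qualities cutoff base _
  unfold Spec_quality_trim_index quality_trim_index quality_trim_index_alt
  simp only []
  rw [qtiLoopA_eq_fused, qtiPairs_eq_map_pyRange]
  have h := qtiFused_eq_argmax cutoff base (qualities.toList.length : Int)
      qualities.toList.reverse 0 0 0 none
  simp only [qtiIdx] at h
  rw [h]
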